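-- pv_equiv track=rewrite | github.com/himinqq/algorithm_py | box.py | solution
-- ===== SOURCE A (Python) =====
-- def solution(order):
--
--     main = 1  # 현재 메인 컨테이너 벨트에서 꺼낼 상자 번호
--     stack = []
--     idx = 0  # order에서 현재 실어야 할 상자 위치
--
--     while main <= len(order):
--         if order[idx] == main:
--             idx += 1
--             main += 1
--         elif stack and stack[-1] == order[idx]:
--             stack.pop()
--             idx += 1
--         else:
--             stack.append(main)
--             main += 1
--
--     # 남은 stack 처리
--     while stack and idx < len(order) and stack[-1] == order[idx]:
--         stack.pop()
--         idx += 1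
--
--     return idx
-- ===== SOURCE B (Python) =====
-- def solution(order):
--     # Stack-free: a target t is loadable iff it is a fresh box (next_box <= t <= n,
--     # conceptually pushing next_box..t-1 and shipping t directly) or it is the maximum
--     # not-yet-shipped box below next_box (every box strictly between t and next_box
--     # already shipped) -- which is exactly the value the stack top would hold.
--     n = len(order)
--     next_box = 1
--     shipped = set()
--     idx = 0
--     for t in order:
--         if next_box <= t <= n:
--             next_box = t + 1
--         elif not (1 <= t < next_box and t not in shipped
--                   and all(v in shipped for v in range(t + 1, next_box))):
--             break
--         shipped.add(t)
--         idx += 1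
--     return idx
-- ===== Notes on version B (the rewrite author's own statement) =====
-- stated objective: alternative
-- what changed: Removes the stack entirely: instead of simulating pushes/pops over box numbers, B iterates over the targets in order, keeping only next_box and a shipped set, and loads a target iff it is a fresh box or the maximum not-yet-shipped box below next_box (every box strictly between it and next_box already shipped) - the arithmetic characterisation of the stack top.
import Mathlib
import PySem

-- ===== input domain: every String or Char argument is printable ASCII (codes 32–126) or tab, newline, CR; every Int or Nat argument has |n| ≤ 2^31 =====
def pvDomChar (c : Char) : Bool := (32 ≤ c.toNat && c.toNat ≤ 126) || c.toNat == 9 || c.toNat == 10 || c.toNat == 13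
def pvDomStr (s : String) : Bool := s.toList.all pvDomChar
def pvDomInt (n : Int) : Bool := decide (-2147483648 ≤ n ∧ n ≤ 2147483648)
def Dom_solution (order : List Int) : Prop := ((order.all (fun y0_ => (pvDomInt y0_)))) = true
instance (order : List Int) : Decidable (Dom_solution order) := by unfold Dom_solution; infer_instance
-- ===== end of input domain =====

-- B removes the stack entirely: it iterates over the targets in `order` keeping only
-- `next_box` and a `shipped` set, loading a target iff it is a fresh box or the maximum
-- not-yet-shipped box below next_box (alternative formulation, not claimed faster).

-- ===== PORT A =====
-- A's main `while main <= len(order)` loop; stack is held head-as-top.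
-- `order[idx]` via pyGet?; the `none` branch is a totality guard
-- (in A's actual runs 0 ≤ idx < len(order) always holds inside the loop; A never raises).
def solutionLoop (order : List Int) (main : Int) (stack : List Int) (idx : Int) :
    List Int × Int :=
  if _h : main ≤ (order.length : Int) then
    match PySem.List.pyGet? order idx with
    | none => (stack, idx)
    | some v =>
      if v = main then
        solutionLoop order (main + 1) stack (idx + 1)
      else
        match stack with
        | top :: rest =>
          if top = v then solutionLoop order main rest (idx + 1)
          else solutionLoop order (main + 1) (main :: top :: rest) idx
        | [] => solutionLoop order (main + 1) (main :: ([] : List Int)) idx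
  else (stack, idx)
termination_by (((order.length : Int) + 1 - main).toNat, stack.length)
decreasing_by
  · exact Prod.Lex.left _ _ (by omega)
  · exact Prod.Lex.right _ (by simp)
  · exact Prod.Lex.left _ _ (by omega)
  · exact Prod.Lex.left _ _ (by omega)

-- A's tail `while stack and idx < len(order) and stack[-1] == order[idx]` loop.
def solutionTail (order : List Int) (stack : List Int) (idx : Int) : List Int × Int :=
  match stack with
  | [] => ([], idx)
  | top :: rest =>
    if idx < (order.length : Int) then
      match PySem.List.pyGet? order idx with
      | some v => if top = v then solutionTail order rest (idx + 1) else (top :: rest, idx)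
      | none => (top :: rest, idx)
    else (top :: rest, idx)

def solution (order : List Int) : Int :=
  let p := solutionLoop order 1 [] 0
  (solutionTail order p.1 p.2).2

-- ===== PORT B =====
-- B's `for t in order` loop with its break; `shipped` is a Python set (PySem.Set).
def bloop (n : Int) (rem : List Int) (next : Int) (shipped : PySem.Set Int) (idx : Int) : Int :=
  match rem with
  | [] => idx
  | t :: rest =>
    if next ≤ t ∧ t ≤ n then
      bloop n rest (t + 1) (PySem.Set.add shipped t) (idx + 1)
    else if ¬ (1 ≤ t ∧ t < next ∧ PySem.Set.contains shipped t = false ∧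
        ((PySem.List.pyRange (t + 1) next 1).all fun v => PySem.Set.contains shipped v) = true) then
      idx
    else
      bloop n rest next (PySem.Set.add shipped t) (idx + 1)

def solution_alt (order : List Int) : Int :=
  bloop (order.length : Int) order 1 PySem.Set.empty 0

-- ===== PRECONDITION & SPEC =====
def Spec_solution (order : List Int) (out : Int) : Prop := out = solution_alt order
instance (order : List Int) (out : Int) : Decidable (Spec_solution order out) := by unfold Spec_solution; infer_instance

-- ===== CLAIM (what is proved, stated in full; the proofs are below) =====
def Claim_equal_solution : Prop := ∀ (order : List Int), Dom_solution order → Spec_solution order (solution order)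

-- ===== LEMMAS AND PROOFS =====

-- The stack A holds when the next fresh box is `N`: the not-yet-shipped boxes below `N`,
-- largest on top.
def stk (N : Int) (shipped : PySem.Set Int) : List Int :=
  ((PySem.List.pyRange 1 N 1).filter (fun v => !PySem.Set.contains shipped v)).reverse

-- A's whole computation from a mid-run state.
def arun (order : List Int) (m : Int) (s : List Int) (i : Int) : Int :=
  (solutionTail order (solutionLoop order m s i).1 (solutionLoop order m s i).2).2

theorem stk_mem {N : Int} {shipped : PySem.Set Int} {x : Int} (h : x ∈ stk N shipped) :
    1 ≤ x ∧ x < N ∧ x ∉ shipped := by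
  simp only [stk, List.mem_reverse, List.mem_filter] at h
  obtain ⟨hr, hc⟩ := h
  rw [PySem.List.mem_pyRange_one] at hr
  simp at hc
  exact ⟨hr.1, hr.2, hc⟩

theorem stk_top_max {N : Int} {shipped : PySem.Set Int} {x : Int} {rest : List Int}
    (h : stk N shipped = x :: rest) :
    ∀ v, 1 ≤ v → v < N → v ∉ shipped → v ≤ x := by
  intro v h1 h2 h3
  have hL : (PySem.List.pyRange 1 N 1).filter (fun v => !PySem.Set.contains shipped v)
      = rest.reverse ++ [x] := by
    have := congrArg List.reverse h
    simpa [stk] using this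
  have hpw : ((PySem.List.pyRange 1 N 1).filter
      (fun v => !PySem.Set.contains shipped v)).Pairwise (· < ·) :=
    List.Pairwise.sublist List.filter_sublist (PySem.List.pairwise_lt_pyRange_one 1 N)
  rw [hL] at hpw
  have hvmem : v ∈ rest.reverse ++ [x] := by
    rw [← hL]
    simp only [List.mem_filter]
    refine ⟨by rw [PySem.List.mem_pyRange_one]; omega, by simp [h3]⟩
  rcases List.mem_append.mp hvmem with hv | hv
  · have := (List.pairwise_append.mp hpw).2.2 v hv x (by simp)
    omega
  · simp at hv; omega

-- Splitting the stack at a lower fresh-box mark.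
theorem stk_split {N next : Int} {shipped : PySem.Set Int}
    (h1 : 1 ≤ next) (h2 : next ≤ N) (hb : ∀ v ∈ shipped, v < next) :
    stk N shipped = (PySem.List.pyRange next N 1).reverse ++ stk next shipped := by
  rw [stk, PySem.List.pyRange_one_append 1 next N h1 h2, List.filter_append]
  have hid : (PySem.List.pyRange next N 1).filter (fun v => !PySem.Set.contains shipped v)
      = PySem.List.pyRange next N 1 := by
    rw [List.filter_eq_self]
    intro v hv
    rw [PySem.List.mem_pyRange_one] at hv
    have hni : v ∉ shipped := fun hm => absurd (hb v hm) (by omega)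
    simp [hni]
  rw [hid, List.reverse_append, stk]

-- Shipping a fresh box t (next ≤ t): the boxes next..t-1 get pushed.
theorem stk_ship {next t : Int} {shipped : PySem.Set Int}
    (hb : ∀ v ∈ shipped, 1 ≤ v ∧ v < next) (h1 : 1 ≤ next) (ht : next ≤ t) :
    stk (t + 1) (PySem.Set.add shipped t)
      = (PySem.List.pyRange next t 1).reverse ++ stk next shipped := by
  rw [stk, PySem.List.pyRange_one_append 1 next (t+1) h1 (by omega),
    PySem.List.pyRange_one_append next t (t+1) ht (by omega),
    PySem.List.pyRange_one_singleton]
  rw [List.filter_append, List.filter_append]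
  have e1 : (PySem.List.pyRange 1 next 1).filter
        (fun v => !PySem.Set.contains (PySem.Set.add shipped t) v)
      = (PySem.List.pyRange 1 next 1).filter (fun v => !PySem.Set.contains shipped v) := by
    apply List.filter_congr
    intro v hv
    rw [PySem.List.mem_pyRange_one] at hv
    have hvt : v ≠ t := by omega
    simp [PySem.Set.mem_add, hvt]
  have e2 : (PySem.List.pyRange next t 1).filter
        (fun v => !PySem.Set.contains (PySem.Set.add shipped t) v)
      = PySem.List.pyRange next t 1 := by
    rw [List.filter_eq_self]
    intro v hv
    rw [PySem.List.mem_pyRange_one] at hv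
    simp only [Bool.not_eq_true', ← Bool.not_eq_true, PySem.Set.contains_iff,
      PySem.Set.mem_add]
    rintro (hm | hvt)
    · exact absurd (hb v hm).2 (by omega)
    · omega
  have e3 : ([t] : List Int).filter (fun v => !PySem.Set.contains (PySem.Set.add shipped t) v)
      = [] := by
    simp [PySem.Set.mem_add]
  rw [e1, e2, e3, List.append_nil, List.reverse_append, stk]

-- Popping the top t (= the maximum unshipped box below next).
theorem stk_pop {next t : Int} {shipped : PySem.Set Int}
    (h1t : 1 ≤ t) (htn : t < next) (hts : t ∉ shipped)
    (hall : ∀ v, t < v → v < next → v ∈ shipped) :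
    stk next shipped = t :: stk next (PySem.Set.add shipped t) := by
  have hsplit : PySem.List.pyRange 1 next 1
      = PySem.List.pyRange 1 t 1 ++ (t :: PySem.List.pyRange (t+1) next 1) := by
    rw [PySem.List.pyRange_one_append 1 t next h1t (by omega),
      PySem.List.pyRange_one_cons htn]
  have edrop : ∀ (s : PySem.Set Int), (∀ v, t < v → v < next → v ∈ s) →
      (PySem.List.pyRange (t+1) next 1).filter (fun v => !PySem.Set.contains s v) = [] := by
    intro s hs
    rw [List.filter_eq_nil_iff]
    intro v hv
    rw [PySem.List.mem_pyRange_one] at hv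
    simp [hs v (by omega) (by omega)]
  have elow : (PySem.List.pyRange 1 t 1).filter
        (fun v => !PySem.Set.contains (PySem.Set.add shipped t) v)
      = (PySem.List.pyRange 1 t 1).filter (fun v => !PySem.Set.contains shipped v) := by
    apply List.filter_congr
    intro v hv
    rw [PySem.List.mem_pyRange_one] at hv
    have hvt : v ≠ t := by omega
    simp [PySem.Set.mem_add, hvt]
  rw [stk, stk, hsplit, List.filter_append, List.filter_append,
    List.filter_cons, List.filter_cons,
    edrop shipped hall, edrop (PySem.Set.add shipped t)
      (fun v hv1 hv2 => (PySem.Set.mem_add _ _ _).mpr (Or.inl (hall v hv1 hv2))), elow]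
  simp [hts]

-- A's push run that ends by shipping t directly (next ≤ t ≤ n).
theorem push_run (order : List Int) (t i : Int)
    (hget : PySem.List.pyGet? order i = some t) (hlen : t ≤ (order.length : Int)) :
    ∀ (fuel : Nat) (m : Int) (stack : List Int), (t - m).toNat = fuel → m ≤ t →
      (∀ x ∈ stack, x < t) →
      solutionLoop order m stack i
        = solutionLoop order (t + 1) ((PySem.List.pyRange m t 1).reverse ++ stack) (i + 1) := by
  intro fuel
  induction fuel with
  | zero =>
    intro m stack hf hm _
    have : m = t := by omega
    subst this
    conv_lhs => rw [solutionLoop]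
    simp only [dif_pos hlen, hget]
    rw [if_pos trivial, PySem.List.pyRange_one_eq_nil le_rfl]
    simp
  | succ f ih =>
    intro m stack hf hm hst
    have hmt : m < t := by omega
    have hstep : solutionLoop order m stack i = solutionLoop order (m + 1) (m :: stack) i := by
      conv_lhs => rw [solutionLoop]
      simp only [dif_pos (show m ≤ (order.length : Int) by omega), hget]
      rw [if_neg (show ¬ t = m by omega)]
      cases stack with
      | nil => rfl
      | cons top rest =>
        show (if top = t then solutionLoop order m rest (i + 1)
            else solutionLoop order (m + 1) (m :: top :: rest) i)
          = solutionLoop order (m + 1) (m :: top :: rest) i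
        rw [if_neg (show ¬ top = t by have := hst top (by simp); omega)]
    rw [hstep, ih (m + 1) (m :: stack) (by omega) (by omega)
      (by intro x hx; rcases List.mem_cons.mp hx with h | h
          · omega
          · exact hst x h)]
    rw [PySem.List.pyRange_one_cons hmt, List.reverse_cons, List.append_assoc]
    rfl

-- A's push run when the current target t is never shippable: pushes everything and exits.
theorem push_all (order : List Int) (t i : Int)
    (hget : PySem.List.pyGet? order i = some t) :
    ∀ (fuel : Nat) (m : Int) (stack : List Int), ((order.length : Int) + 1 - m).toNat = fuel →
      (∀ m', m ≤ m' → m' ≤ (order.length : Int) → m' ≠ t) →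
      (∀ x, stack.head? = some x → x ≠ t) →
      solutionLoop order m stack i
        = ((PySem.List.pyRange m ((order.length : Int) + 1) 1).reverse ++ stack, i) := by
  intro fuel
  induction fuel with
  | zero =>
    intro m stack hf _ _
    conv_lhs => rw [solutionLoop]
    rw [dif_neg (show ¬ (m ≤ (order.length : Int)) by omega),
      PySem.List.pyRange_one_eq_nil (by omega)]
    rfl
  | succ f ih =>
    intro m stack hf hm hhd
    have hmn : m ≤ (order.length : Int) := by omega
    have hstep : solutionLoop order m stack i = solutionLoop order (m + 1) (m :: stack) i := by
      conv_lhs => rw [solutionLoop]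
      simp only [dif_pos hmn, hget]
      rw [if_neg (fun hc => hm m (le_refl m) hmn hc.symm)]
      cases stack with
      | nil => rfl
      | cons top rest =>
        show (if top = t then solutionLoop order m rest (i + 1)
            else solutionLoop order (m + 1) (m :: top :: rest) i)
          = solutionLoop order (m + 1) (m :: top :: rest) i
        rw [if_neg (hhd top rfl)]
    rw [hstep, ih (m + 1) (m :: stack) (by omega)
      (fun m' h1 h2 => hm m' (by omega) h2)
      (by intro x hx
          simp only [List.head?_cons, Option.some.injEq] at hx
          subst hx
          exact hm m (le_refl m) hmn)]
    rw [PySem.List.pyRange_one_cons (show m < (order.length : Int) + 1 by omega),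
      List.reverse_cons, List.append_assoc]
    rfl

-- The tail loop with the index already at the end.
theorem tail_at_end (order : List Int) (s : List Int) :
    (solutionTail order s (order.length : Int)).2 = (order.length : Int) := by
  cases s with
  | nil => rfl
  | cons top rest => simp [solutionTail]

-- The tail loop when the top (if any) does not match the current target.
theorem tail_stuck (order : List Int) (s : List Int) (i t : Int)
    (hget : PySem.List.pyGet? order i = some t)
    (hhd : ∀ x, s.head? = some x → x ≠ t) :
    (solutionTail order s i).2 = i := by
  cases s with
  | nil => rfl
  | cons top rest =>
    rw [solutionTail]
    by_cases hi : i < (order.length : Int)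
    · rw [if_pos hi]
      simp only [hget]
      rw [if_neg (hhd top rfl)]
    · rw [if_neg hi]

-- Heads of the stack are never the unshippable target t.
theorem stk_head_ne {N next t : Int} {shipped : PySem.Set Int}
    (_hb : ∀ v ∈ shipped, 1 ≤ v ∧ v < next) (hNn : next ≤ N)
    (hcase : t < 1 ∨ N ≤ t ∨ t ∈ shipped ∨ (∃ v, t < v ∧ 1 ≤ v ∧ v < next ∧ v ∉ shipped)) :
    ∀ x, (stk N shipped).head? = some x → x ≠ t := by
  intro x hx
  cases hs : stk N shipped with
  | nil => rw [hs] at hx; simp at hx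
  | cons y rest =>
    rw [hs] at hx
    simp only [List.head?_cons, Option.some.injEq] at hx
    have hymem : y ∈ stk N shipped := by rw [hs]; simp
    obtain ⟨hx1, hxN, hxs⟩ := stk_mem hymem
    rw [← hx]
    rcases hcase with h | h | h | ⟨v, hv1, hv1', hv2, hv3⟩
    · omega
    · omega
    · intro hc; subst hc; exact hxs h
    · have := stk_top_max hs v (by omega) (by omega) hv3
      omega

-- Main invariant: from a synchronized state, A's remaining run equals B's remaining loop.
theorem key (order : List Int) :
    ∀ (rem pre : List Int) (next : Int) (shipped : PySem.Set Int),
      order = pre ++ rem → 1 ≤ next → next ≤ (order.length : Int) + 1 →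
      (∀ v ∈ shipped, 1 ≤ v ∧ v < next) →
      arun order next (stk next shipped) (pre.length : Int)
        = bloop (order.length : Int) rem next shipped (pre.length : Int) := by
  intro rem
  induction rem with
  | nil =>
    intro pre next shipped horder h1 h2 hb
    have hlen : (pre.length : Int) = (order.length : Int) := by
      subst horder; simp
    have hnone : PySem.List.pyGet? order (order.length : Int) = none := by
      rw [PySem.List.pyGet?_natCast]; simp
    simp only [bloop]
    unfold arun
    rw [hlen]
    by_cases hn : next ≤ (order.length : Int)
    · have hL : solutionLoop order next (stk next shipped) (order.length : Int)
          = (stk next shipped, (order.length : Int)) := by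
        rw [solutionLoop]
        simp only [dif_pos hn, hnone]
      rw [hL]
      exact tail_at_end order _
    · have hL : solutionLoop order next (stk next shipped) (order.length : Int)
          = (stk next shipped, (order.length : Int)) := by
        rw [solutionLoop]
        simp only [dif_neg hn]
      rw [hL]
      exact tail_at_end order _
  | cons t rest ih =>
    intro pre next shipped horder h1 h2 hb
    have hget : PySem.List.pyGet? order (pre.length : Int) = some t := by
      subst horder
      exact PySem.List.pyGet?_append_length pre rest t
    have hidxlt : (pre.length : Int) < (order.length : Int) := by
      have : order.length = pre.length + (rest.length + 1) := by subst horder; simp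
      omega
    have hsucc : ((pre ++ [t]).length : Int) = (pre.length : Int) + 1 := by
      simp
    have horder' : order = (pre ++ [t]) ++ rest := by
      subst horder; simp
    by_cases hfresh : next ≤ t ∧ t ≤ (order.length : Int)
    · -- fresh box: A pushes next..t-1 then ships t
      simp only [bloop]
      rw [if_pos hfresh]
      have hA : solutionLoop order next (stk next shipped) (pre.length : Int)
          = solutionLoop order (t + 1) (stk (t + 1) (PySem.Set.add shipped t))
              ((pre.length : Int) + 1) := by
        rw [push_run order t (pre.length : Int) hget hfresh.2 (t - next).toNat next
          (stk next shipped) rfl hfresh.1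
          (by intro x hx; have := (stk_mem hx).2.1; omega)]
        rw [stk_ship hb h1 hfresh.1]
      unfold arun
      rw [hA]
      have := ih (pre ++ [t]) (t + 1) (PySem.Set.add shipped t) horder'
        (by omega) (by omega)
        (by intro v hv
            rcases (PySem.Set.mem_add _ _ _).mp hv with h | h
            · have := hb v h; omega
            · omega)
      unfold arun at this
      rw [hsucc] at this
      exact this
    · by_cases hpop : 1 ≤ t ∧ t < next ∧ PySem.Set.contains shipped t = false ∧
          ((PySem.List.pyRange (t + 1) next 1).all fun v => PySem.Set.contains shipped v) = true
      · -- t is the maximum unshipped box below next: A pops it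
        simp only [bloop]
        rw [if_neg hfresh, if_neg (not_not_intro hpop)]
        obtain ⟨hp1, hp2, hp3, hp4⟩ := hpop
        have hts : t ∉ shipped := by simpa using hp3
        have hall : ∀ v, t < v → v < next → v ∈ shipped := by
          intro v hv1 hv2
          have := List.all_eq_true.mp hp4 v (by rw [PySem.List.mem_pyRange_one]; omega)
          simpa using this
        have hstk := stk_pop hp1 hp2 hts hall
        have hb' : ∀ v ∈ PySem.Set.add shipped t, 1 ≤ v ∧ v < next := by
          intro v hv
          rcases (PySem.Set.mem_add _ _ _).mp hv with h | h
          · exact hb v h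
          · omega
        have := ih (pre ++ [t]) next (PySem.Set.add shipped t) horder' h1 h2 hb'
        rw [hsucc] at this
        rw [← this]
        unfold arun
        by_cases hn : next ≤ (order.length : Int)
        · -- still in the main loop: pop step
          have hA : solutionLoop order next (stk next shipped) (pre.length : Int)
              = solutionLoop order next (stk next (PySem.Set.add shipped t))
                  ((pre.length : Int) + 1) := by
            conv_lhs => rw [hstk, solutionLoop]
            simp only [dif_pos hn, hget]
            rw [if_neg (show ¬ t = next by omega), if_pos trivial]
          rw [hA]
        · -- main loop already done (next = n+1): tail pop step
          have hid : ∀ s, solutionLoop order next s ((pre.length : Int))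
              = (s, (pre.length : Int)) := by
            intro s
            rw [solutionLoop]
            simp only [dif_neg hn]
          have hid' : ∀ s, solutionLoop order next s ((pre.length : Int) + 1)
              = (s, (pre.length : Int) + 1) := by
            intro s
            rw [solutionLoop]
            simp only [dif_neg hn]
          rw [hid, hid', hstk]
          show (if (pre.length : Int) < (order.length : Int) then
              match PySem.List.pyGet? order (pre.length : Int) with
              | some v => if t = v then
                  solutionTail order (stk next (PySem.Set.add shipped t))
                    ((pre.length : Int) + 1)
                else (t :: stk next (PySem.Set.add shipped t), (pre.length : Int))
              | none => (t :: stk next (PySem.Set.add shipped t), (pre.length : Int))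
            else (t :: stk next (PySem.Set.add shipped t), (pre.length : Int))).2
            = (solutionTail order (stk next (PySem.Set.add shipped t))
                ((pre.length : Int) + 1)).2
          rw [if_pos hidxlt]
          simp only [hget]
          rw [if_pos trivial]
      · -- neither shippable: B breaks; A pushes everything and the tail drains nothing
        simp only [bloop]
        rw [if_neg hfresh, if_pos hpop]
        have hcase : t < 1 ∨ next ≤ t ∨ t ∈ shipped ∨ (∃ v, t < v ∧ 1 ≤ v ∧ v < next ∧ v ∉ shipped) := by
          by_cases ha : 1 ≤ t
          · by_cases hc : t < next
            · by_cases hm : t ∈ shipped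
              · exact Or.inr (Or.inr (Or.inl hm))
              · have hd : PySem.Set.contains shipped t = false := by simp [hm]
                have hne : ((PySem.List.pyRange (t + 1) next 1).all
                    fun v => PySem.Set.contains shipped v) ≠ true :=
                  fun hall => hpop ⟨ha, hc, hd, hall⟩
                simp only [ne_eq, Bool.not_eq_true, List.all_eq_false] at hne
                obtain ⟨v, hv, hvc⟩ := hne
                rw [PySem.List.mem_pyRange_one] at hv
                refine Or.inr (Or.inr (Or.inr ⟨v, by omega, by omega, by omega, ?_⟩))
                simpa using hvc
            · omega
          · omega
        have hcase' : t < 1 ∨ (order.length : Int) + 1 ≤ t ∨ t ∈ shipped ∨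
            (∃ v, t < v ∧ 1 ≤ v ∧ v < next ∧ v ∉ shipped) := by
          rcases hcase with h | h | h | h
          · exact Or.inl h
          · -- t ≥ next and ¬(next ≤ t ∧ t ≤ n) force t > n
            have htn : ¬ t ≤ (order.length : Int) := fun hle => hfresh ⟨h, hle⟩
            exact Or.inr (Or.inl (by omega))
          · exact Or.inr (Or.inr (Or.inl h))
          · exact Or.inr (Or.inr (Or.inr h))
        unfold arun
        have hA : solutionLoop order next (stk next shipped) (pre.length : Int)
            = (stk ((order.length : Int) + 1) shipped, (pre.length : Int)) := by
          rw [push_all order t (pre.length : Int) hget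
            ((order.length : Int) + 1 - next).toNat next (stk next shipped) rfl
            (by intro m' hm1 hm2
                rcases hcase' with h | h | h | ⟨v, hv1, hv1', hv2, hv3⟩
                · omega
                · omega
                · have := (hb t h).2; omega
                · omega)
            (stk_head_ne hb (le_refl next) hcase)]
          rw [stk_split h1 h2 (fun v hv => (hb v hv).2)]
        rw [hA]
        exact tail_stuck order _ _ t hget
          (stk_head_ne hb (by omega) hcase')

-- ===== VERDICT (by name: the statement is the Claim_ definition above) =====
theorem solution_spec : Claim_equal_solution := by
  intro order _
  show solution order = solution_alt order
  have h := key order order [] 1 PySem.Set.empty rfl (le_refl 1)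
    (by have : (0:Int) ≤ (order.length : Int) := Int.natCast_nonneg _; omega)
    (by intro v hv; cases hv)
  have hstk : stk 1 PySem.Set.empty = [] := by
    rw [stk, PySem.List.pyRange_one_eq_nil (le_refl 1)]
    rfl
  rw [hstk] at h
  simpa [solution, arun, solution_alt] using h
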